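-- pv_equiv track=rewrite | github.com/VladTomici14/Team1-Magna-Lab | src/validator.py | GetFirstCharacters
-- ===== SOURCE A (Python) =====
-- def GetFirstCharacters(plate, plate_index):
--     result = ""
--
--     for character in plate:
--         if character.isdigit():
--             break
--         result += character
--         plate_index += 1
--
--     return result, plate_index
-- ===== SOURCE B (Python) =====
-- def GetFirstCharacters(plate, plate_index):
--     split = next((i for i, c in enumerate(plate) if c.isdigit()), len(plate))
--     return "".join(plate[:split]), plate_index + split
-- ===== Notes on version B (the rewrite author's own statement) =====
-- stated objective: alternative
-- what changed: Replaces the char-by-char accumulation loop (building the result string and incrementing the index each step) by locate-the-boundary first (index of the first digit) and then a single slice plus one addition.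
import Mathlib
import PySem

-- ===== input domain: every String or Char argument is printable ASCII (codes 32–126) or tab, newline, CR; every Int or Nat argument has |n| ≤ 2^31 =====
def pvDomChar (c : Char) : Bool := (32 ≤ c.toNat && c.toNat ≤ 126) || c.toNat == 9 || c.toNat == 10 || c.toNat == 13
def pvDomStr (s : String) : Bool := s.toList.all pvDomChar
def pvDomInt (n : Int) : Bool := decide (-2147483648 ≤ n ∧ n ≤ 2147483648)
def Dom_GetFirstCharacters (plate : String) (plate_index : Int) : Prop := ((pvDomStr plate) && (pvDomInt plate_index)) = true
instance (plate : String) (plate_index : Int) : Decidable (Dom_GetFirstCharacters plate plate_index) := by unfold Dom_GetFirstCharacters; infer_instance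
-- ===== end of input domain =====

-- B replaces A's accumulate-as-you-go loop by locating the first digit, then one slice and one addition (alternative decomposition, same cost).

-- ===== PORT A =====
-- the for-loop with break: carries the accumulated result string and the running index
def GFC_loopA : List Char → String → Int → String × Int
  | [], result, plate_index => (result, plate_index)
  | c :: rest, result, plate_index =>
    if PySem.Chars.isdigit c then (result, plate_index)
    else GFC_loopA rest (result.push c) (plate_index + 1)

def GetFirstCharacters (plate : String) (plate_index : Int) : String × Int :=
  GFC_loopA plate.toList "" plate_index

-- ===== PORT B =====
-- next((i for i, c in enumerate(plate) if c.isdigit()), len(plate))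
def GFC_split : List Char → Nat
  | [] => 0
  | c :: rest => if PySem.Chars.isdigit c then 0 else GFC_split rest + 1

def GetFirstCharacters_alt (plate : String) (plate_index : Int) : String × Int :=
  let split := GFC_split plate.toList
  (String.ofList (plate.toList.take split), plate_index + (split : Int))

-- ===== PRECONDITION & SPEC =====
def Spec_GetFirstCharacters (plate : String) (plate_index : Int) (out : String × Int) : Prop := out = GetFirstCharacters_alt plate plate_index
instance (plate : String) (plate_index : Int) (out : String × Int) : Decidable (Spec_GetFirstCharacters plate plate_index out) := by unfold Spec_GetFirstCharacters; infer_instance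

-- ===== CLAIM (what is proved, stated in full; the proofs are below) =====
def Claim_equal_GetFirstCharacters : Prop := ∀ (plate : String) (plate_index : Int), Dom_GetFirstCharacters plate plate_index → Spec_GetFirstCharacters plate plate_index (GetFirstCharacters plate plate_index)

-- ===== LEMMAS AND PROOFS =====
theorem GFC_loopA_eq (cs : List Char) : ∀ (res : String) (idx : Int),
    GFC_loopA cs res idx =
      (String.ofList (res.toList ++ cs.take (GFC_split cs)), idx + (GFC_split cs : Int)) := by
  induction cs with
  | nil => intro res idx; simp [GFC_loopA, GFC_split, String.ofList_toList]
  | cons c rest ih =>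
    intro res idx
    by_cases h : PySem.Chars.isdigit c
    · simp [GFC_loopA, GFC_split, h, String.ofList_toList]
    · simp only [GFC_loopA, GFC_split, h, if_neg, Bool.false_eq_true, not_false_iff]
      rw [ih]
      refine Prod.ext ?_ ?_
      · simp
      · push_cast; ring

-- ===== VERDICT (by name: the statement is the Claim_ definition above) =====
theorem GetFirstCharacters_spec : Claim_equal_GetFirstCharacters := by
  intro plate plate_index _
  show _ = _
  rw [GetFirstCharacters, GetFirstCharacters_alt, GFC_loopA_eq]
  simp
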